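-- pv_equiv track=rewrite | github.com/Adam-Al-Rahman/netzwerx | netzwerx/cfg/__init__.py | merge_equals_args
-- ===== SOURCE A (Python) =====
-- from typing import List, Dict, Union
--
-- def merge_equals_args(args: List[str]) -> List[str]:
--   """
--     Merges arguments around isolated '=' args in a list of strings. The function considers cases where the first
--     argument ends with '=' or the second starts with '=', as well as when the middle one is an equals sign.
--
--     Args:
--         args (List[str]): A list of strings where each element is an argument.
--
--     Returns:
--         List[str]: A list of strings where the arguments around isolated '=' are merged.
--     """
--   new_args = []
--   for i, arg in enumerate(args):
--     if arg == '=' and 0 < i < len(args) - 1:  # merge ['arg', '=', 'val']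
--       new_args[-1] += f'={args[i + 1]}'
--       del args[i + 1]
--     elif arg.endswith('=') and i < len(args) - 1 and '=' not in args[i + 1]:  # merge ['arg=', 'val']
--       new_args.append(f'{arg}{args[i + 1]}')
--       del args[i + 1]
--     elif arg.startswith('=') and i > 0:  # merge ['arg', '=val']
--       new_args[-1] += arg
--     else:
--       new_args.append(arg)
--   return new_args
-- ===== SOURCE B (Python) =====
-- def merge_equals_args(args):
--     # One-lookahead iterator scan: pull elements from an iterator, keeping the
--     # next element in `nxt`; consuming it means pulling one more. No indices,
--     # no in-place deletion (A mutates its argument; return value is the same).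
--     out = []
--     it = iter(args)
--     cur = next(it, None)
--     nxt = next(it, None)
--     first = True
--     while cur is not None:
--         if cur == '=' and not first and nxt is not None:
--             out[-1] += '=' + nxt
--             nxt = next(it, None)
--         elif cur.endswith('=') and nxt is not None and '=' not in nxt:
--             out.append(cur + nxt)
--             nxt = next(it, None)
--         elif cur.startswith('=') and not first:
--             out[-1] += cur
--         else:
--             out.append(cur)
--         first = False
--         cur, nxt = nxt, next(it, None)
--     return out
-- ===== Notes on version B (the rewrite author's own statement) =====
-- stated objective: alternative
-- what changed: A loops by index over a list it keeps mutating with in-place del of each consumed element; B streams the arguments through an iterator with a one-element lookahead, so consuming the next element is just pulling once more and the input list is never touched.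
import Mathlib
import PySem

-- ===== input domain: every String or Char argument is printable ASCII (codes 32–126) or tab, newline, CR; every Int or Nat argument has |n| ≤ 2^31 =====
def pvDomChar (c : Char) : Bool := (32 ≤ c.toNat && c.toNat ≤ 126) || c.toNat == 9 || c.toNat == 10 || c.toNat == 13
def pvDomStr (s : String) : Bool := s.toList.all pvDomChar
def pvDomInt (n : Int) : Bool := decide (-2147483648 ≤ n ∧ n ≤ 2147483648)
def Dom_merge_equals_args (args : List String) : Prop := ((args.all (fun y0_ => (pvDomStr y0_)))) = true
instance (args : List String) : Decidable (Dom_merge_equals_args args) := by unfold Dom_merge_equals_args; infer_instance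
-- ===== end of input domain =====

-- B replaces A's index loop with in-place `del args[i+1]` by a one-lookahead iterator stream (in Lean: structural
-- recursion on the remaining list); equivalence is about the RETURN value only (A mutates its argument, B does not).

-- ===== PORT A =====
-- new_args[-1] += s  (only reached with new_args nonempty; Python would raise IndexError on [] — unreachable from the entry)
def pvAddLastA (ys : List String) (s : String) : List String :=
  ys.dropLast ++ [ys.getLastD "" ++ s]

-- the for-loop over enumerate(args) with `del args[i + 1]`: i is the position in the CURRENT (mutated) list;
-- fuel is a pure totality guard (fuel = length is always enough)
def mergeLoopA : Nat → List String → Nat → List String → List String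
  | 0, _, _, new_args => new_args
  | fuel + 1, args, i, new_args =>
    if h : i < args.length then
      let arg := args[i]
      if arg = "=" ∧ 0 < i ∧ i < args.length - 1 then
        mergeLoopA fuel (args.eraseIdx (i + 1)) (i + 1) (pvAddLastA new_args ("=" ++ args.getD (i + 1) ""))
      else if PySem.Str.endswith arg "=" = true ∧ i < args.length - 1 ∧
              ¬ PySem.Str.isIn "=" (args.getD (i + 1) "") = true then
        mergeLoopA fuel (args.eraseIdx (i + 1)) (i + 1) (new_args ++ [arg ++ args.getD (i + 1) ""])
      else if PySem.Str.startswith arg "=" = true ∧ 0 < i then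
        mergeLoopA fuel args (i + 1) (pvAddLastA new_args arg)
      else
        mergeLoopA fuel args (i + 1) (new_args ++ [arg])
    else new_args

def merge_equals_args (args : List String) : List String :=
  mergeLoopA args.length args 0 []

-- ===== PORT B =====
-- out[-1] += s
def pvAddLastB (out : List String) (s : String) : List String :=
  out.dropLast ++ [out.getLastD "" ++ s]

-- the iterator scan: `cur` is the head of the remaining stream, the lookahead `nxt` its next element
-- (none at the end ↦ the `rest ≠ []` tests); consuming the lookahead = recursing on `rest.tail`
def mergeStreamB : List String → Bool → List String → List String
  | [], _, out => out
  | cur :: rest, first, out =>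
    if cur = "=" ∧ first = false ∧ rest ≠ [] then
      mergeStreamB rest.tail false (pvAddLastB out ("=" ++ rest.headD ""))
    else if PySem.Str.endswith cur "=" = true ∧ rest ≠ [] ∧
            ¬ PySem.Str.isIn "=" (rest.headD "") = true then
      mergeStreamB rest.tail false (out ++ [cur ++ rest.headD ""])
    else if PySem.Str.startswith cur "=" = true ∧ first = false then
      mergeStreamB rest false (pvAddLastB out cur)
    else
      mergeStreamB rest false (out ++ [cur])
termination_by rest _ _ => rest.length
decreasing_by
  · cases rest <;> simp
  · cases rest <;> simp
  · simp
  · simp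

def merge_equals_args_alt (args : List String) : List String :=
  mergeStreamB args true []

-- ===== PRECONDITION & SPEC =====
def Spec_merge_equals_args (args : List String) (out : List String) : Prop := out = merge_equals_args_alt args
instance (args : List String) (out : List String) : Decidable (Spec_merge_equals_args args out) := by unfold Spec_merge_equals_args; infer_instance

-- ===== CLAIM (what is proved, stated in full; the proofs are below) =====
def Claim_equal_merge_equals_args : Prop := ∀ (args : List String), Dom_merge_equals_args args → Spec_merge_equals_args args (merge_equals_args args)

-- ===== LEMMAS AND PROOFS =====

lemma pvAddLastB_eq : pvAddLastB = pvAddLastA := rfl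

-- A's state (current list, index i) is (pre ++ rest, pre.length) where pre are the already-kept elements
-- still in the list and rest the unprocessed suffix; then A's loop computes B's stream fold on rest.
lemma mergeLoopA_eq_stream (fuel : Nat) : ∀ (rest pre acc : List String) (first : Bool),
    rest.length ≤ fuel → (first = true ↔ pre = []) →
    mergeLoopA fuel (pre ++ rest) pre.length acc = mergeStreamB rest first acc := by
  induction fuel with
  | zero =>
    intro rest pre acc first hlen hfirst
    have hrest : rest = [] := by cases rest <;> simp_all
    subst hrest
    rw [mergeLoopA, mergeStreamB]
  | succ n ih =>
    intro rest pre acc first hlen hfirst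
    cases rest with
    | nil =>
      rw [mergeLoopA, dif_neg (by simp), mergeStreamB]
    | cons r0 rtl =>
      have hi : pre.length < (pre ++ r0 :: rtl).length := by simp
      have harg : (pre ++ r0 :: rtl)[pre.length]'hi = r0 := by
        rw [List.getElem_append_right (le_refl _)]
        simp
      have hget1 : (pre ++ r0 :: rtl).getD (pre.length + 1) "" = rtl.headD "" := by
        have h1 : (pre ++ r0 :: rtl)[pre.length + 1]? = rtl[0]? := by
          rw [List.getElem?_append_right (by omega)]
          simp
        rw [List.getD_eq_getElem?_getD, h1]
        cases rtl <;> simp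
      have hzero : (0 < pre.length) = (first = false) := by
        cases first <;> simp_all [List.length_pos_iff]
      have hmid : (pre.length < (pre ++ r0 :: rtl).length - 1) = (rtl ≠ []) := by
        rw [← List.length_pos_iff]
        simp only [List.length_append, List.length_cons]
        exact propext (by omega)
      have herase : (pre ++ r0 :: rtl).eraseIdx (pre.length + 1) = (pre ++ [r0]) ++ rtl.tail := by
        rw [List.eraseIdx_append_of_length_le (by omega)]
        cases rtl <;> simp [List.eraseIdx]
      have hsplit : pre ++ r0 :: rtl = (pre ++ [r0]) ++ rtl := by simp
      rw [mergeLoopA, dif_pos hi]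
      simp only [harg, hget1, hzero, hmid, and_comm (a := first = false)]
      rw [mergeStreamB]
      simp only [pvAddLastB_eq, and_comm (a := first = false)]
      split_ifs with h1 h2 h3
      · rw [herase, show pre.length + 1 = (pre ++ [r0]).length by simp]
        exact ih rtl.tail (pre ++ [r0]) _ false (by simp only [List.length_tail, List.length_cons] at hlen ⊢; omega) (by simp)
      · rw [herase, show pre.length + 1 = (pre ++ [r0]).length by simp]
        exact ih rtl.tail (pre ++ [r0]) _ false (by simp only [List.length_tail, List.length_cons] at hlen ⊢; omega) (by simp)
      · rw [hsplit, show pre.length + 1 = (pre ++ [r0]).length by simp]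
        exact ih rtl (pre ++ [r0]) _ false (by simp only [List.length_cons] at hlen; omega) (by simp)
      · rw [hsplit, show pre.length + 1 = (pre ++ [r0]).length by simp]
        exact ih rtl (pre ++ [r0]) _ false (by simp only [List.length_cons] at hlen; omega) (by simp)

-- ===== VERDICT (by name: the statement is the Claim_ definition above) =====
theorem merge_equals_args_spec : Claim_equal_merge_equals_args := by
  intro args _
  unfold Spec_merge_equals_args merge_equals_args merge_equals_args_alt
  have hA := mergeLoopA_eq_stream args.length args [] [] true (le_refl _) (by simp)
  simpa using hA
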